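-- pv_equiv track=rewrite | github.com/ZielinskiSebastian/SAT-QUBO-Framework | sat/qubosearcher.py | create_qubo
-- ===== SOURCE A (Python) =====
-- def create_qubo(qubo, size):
--     qubo_dict = {}
--     idx = 0
--     for i in range(size):
--         for j in range(i, size):
--             qubo_dict[(i, j)] = qubo[idx]
--             idx += 1
--     return qubo_dict
-- ===== SOURCE B (Python) =====
-- def create_qubo(qubo, size):
--     return {(i, j): qubo[i * size - i * (i - 1) // 2 + (j - i)]
--             for i in range(size) for j in range(i, size)}
-- ===== Notes on version B (the rewrite author's own statement) =====
-- stated objective: alternative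
-- what changed: Replaces the sequential running idx counter threaded through the nested loops with a direct closed-form triangular-index computation i*size - i*(i-1)//2 + (j - i) inside a dict comprehension.
import Mathlib
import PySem

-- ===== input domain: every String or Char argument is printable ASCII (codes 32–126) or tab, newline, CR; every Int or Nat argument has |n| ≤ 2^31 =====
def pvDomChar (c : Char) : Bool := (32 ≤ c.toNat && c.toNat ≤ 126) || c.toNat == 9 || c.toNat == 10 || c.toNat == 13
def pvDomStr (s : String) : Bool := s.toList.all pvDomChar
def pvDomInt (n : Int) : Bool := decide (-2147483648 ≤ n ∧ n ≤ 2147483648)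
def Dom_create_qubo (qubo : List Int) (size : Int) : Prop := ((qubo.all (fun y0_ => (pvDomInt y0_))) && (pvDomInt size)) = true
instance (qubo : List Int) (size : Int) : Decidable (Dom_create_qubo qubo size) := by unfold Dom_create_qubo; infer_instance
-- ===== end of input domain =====

-- B replaces A's running flat-index counter with a closed-form triangular index per pair
-- inside a dict comprehension (alternative decomposition, same cost).


-- ===== PORT A =====
-- keys (i, j) are pairwise distinct, so each dict insertion appends a fresh entry;
-- qubo[idx] is PySem.List.pyGetD (total under Pre_, which demands every idx in range)
def create_qubo (qubo : List Int) (size : Int) : List (Int × Int × Int) :=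
  ((PySem.List.pyRange 0 size 1).foldl (fun (st : List (Int × Int × Int) × Int) i =>
    (PySem.List.pyRange i size 1).foldl (fun (st : List (Int × Int × Int) × Int) j =>
      (st.1 ++ [(i, j, PySem.List.pyGetD qubo st.2 0)], st.2 + 1)) st)
    (([] : List (Int × Int × Int)), (0 : Int))).1

-- ===== PORT B =====
def create_qubo_alt (qubo : List Int) (size : Int) : List (Int × Int × Int) :=
  (PySem.List.pyRange 0 size 1).flatMap (fun i =>
    (PySem.List.pyRange i size 1).map (fun j =>
      (i, j, PySem.List.pyGetD qubo (i * size - PySem.Int.floordiv (i * (i - 1)) 2 + (j - i)) 0)))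

-- ===== PRECONDITION & SPEC =====
-- Pre_ excludes exactly the inputs where the Python A raises IndexError: a positive size
-- whose upper triangle has more entries than qubo has elements.
def Pre_create_qubo (qubo : List Int) (size : Int) : Prop :=
  size ≤ 0 ∨ size * (size + 1) ≤ 2 * (qubo.length : Int)
instance (qubo : List Int) (size : Int) : Decidable (Pre_create_qubo qubo size) := by unfold Pre_create_qubo; infer_instance

def pvWitness_create_qubo : List Int × Int := ([1, 2, 3], 2)

def Spec_create_qubo (qubo : List Int) (size : Int) (out : List (Int × Int × Int)) : Prop := out = create_qubo_alt qubo size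
instance (qubo : List Int) (size : Int) (out : List (Int × Int × Int)) : Decidable (Spec_create_qubo qubo size out) := by unfold Spec_create_qubo; infer_instance

-- ===== CLAIM (what is proved, stated in full; the proofs are below) =====
def Claim_equal_create_qubo : Prop := ∀ (qubo : List Int) (size : Int), Dom_create_qubo qubo size → Pre_create_qubo qubo size → Spec_create_qubo qubo size (create_qubo qubo size)

-- ===== LEMMAS AND PROOFS =====

-- A's inner loop: appending one entry per j with a counter that starts at idx,
-- expressed as a map keyed by the offset j - a from the loop start a.
theorem cq_inner (qubo : List Int) (i b : Int) :
    ∀ (n : Nat) (a : Int), (b - a).toNat = n → ∀ (acc : List (Int × Int × Int)) (idx : Int),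
      (PySem.List.pyRange a b 1).foldl (fun (st : List (Int × Int × Int) × Int) j =>
          (st.1 ++ [(i, j, PySem.List.pyGetD qubo st.2 0)], st.2 + 1)) (acc, idx)
        = (acc ++ (PySem.List.pyRange a b 1).map
            (fun j => (i, j, PySem.List.pyGetD qubo (idx + (j - a)) 0)),
           idx + ((b - a).toNat : Int)) := by
  intro n
  induction n with
  | zero =>
    intro a ha acc idx
    rw [PySem.List.pyRange_one_eq_nil (by omega)]
    simp [ha]
  | succ m ih =>
    intro a ha acc idx
    have hab : a < b := by omega
    rw [PySem.List.pyRange_one_cons hab]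
    simp only [List.foldl_cons, List.map_cons]
    rw [ih (a + 1) (by omega) (acc ++ [(i, a, PySem.List.pyGetD qubo idx 0)]) (idx + 1)]
    rw [Prod.mk.injEq]
    refine ⟨?_, ?_⟩
    · have hidx : idx + (a - a) = idx := by ring
      have hmap : List.map (fun j => (i, j, PySem.List.pyGetD qubo (idx + 1 + (j - (a + 1))) 0))
            (PySem.List.pyRange (a + 1) b)
          = List.map (fun j => (i, j, PySem.List.pyGetD qubo (idx + (j - a)) 0))
            (PySem.List.pyRange (a + 1) b) := by
        apply List.map_congr_left
        intro j _
        have h : idx + 1 + (j - (a + 1)) = idx + (j - a) := by ring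
        rw [h]
      rw [hmap, hidx]
      simp
    · have h1 : ((b - a).toNat : Int) = b - a := by omega
      have h2 : ((b - (a + 1)).toNat : Int) = b - (a + 1) := by omega
      omega

-- the closed-form triangular offset of row i
def cq_tri (size i : Int) : Int := i * size - PySem.Int.floordiv (i * (i - 1)) 2

theorem cq_tri_succ (size i : Int) (h1 : i < size) :
    cq_tri size i + ((size - i).toNat : Int) = cq_tri size (i + 1) := by
  unfold cq_tri
  have e1 : 2 ∣ i * (i - 1) := by
    have := Int.even_mul_succ_self (i - 1)
    have h : i * (i - 1) = (i - 1) * (i - 1 + 1) := by ring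
    rw [h]
    exact this.two_dvd
  have e2 : 2 ∣ (i + 1) * (i + 1 - 1) := by
    have := Int.even_mul_succ_self i
    have h : (i + 1) * (i + 1 - 1) = i * (i + 1) := by ring
    rw [h]
    exact this.two_dvd
  have m1 : PySem.Int.mod (i * (i - 1)) 2 = 0 := (PySem.Int.mod_eq_zero_iff_dvd _ _).mpr e1
  have m2 : PySem.Int.mod ((i + 1) * (i + 1 - 1)) 2 = 0 := (PySem.Int.mod_eq_zero_iff_dvd _ _).mpr e2
  have f1 := PySem.Int.floordiv_mul_add_mod (i * (i - 1)) 2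
  have f2 := PySem.Int.floordiv_mul_add_mod ((i + 1) * (i + 1 - 1)) 2
  rw [m1] at f1
  rw [m2] at f2
  have hrel : (i + 1) * (i + 1 - 1) = i * (i - 1) + 2 * i := by ring
  have hto : ((size - i).toNat : Int) = size - i := by omega
  rw [hto]
  nlinarith [f1, f2]

-- A's outer loop starting at row k with counter cq_tri size k produces B's flatMap tail.
theorem cq_outer (qubo : List Int) (size : Int) :
    ∀ (n : Nat) (k : Int), 0 ≤ k → (size - k).toNat = n → ∀ (acc : List (Int × Int × Int)),
      ((PySem.List.pyRange k size 1).foldl (fun (st : List (Int × Int × Int) × Int) i =>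
          (PySem.List.pyRange i size 1).foldl (fun (st : List (Int × Int × Int) × Int) j =>
            (st.1 ++ [(i, j, PySem.List.pyGetD qubo st.2 0)], st.2 + 1)) st)
        (acc, cq_tri size k)).1
      = acc ++ (PySem.List.pyRange k size 1).flatMap (fun i =>
          (PySem.List.pyRange i size 1).map (fun j =>
            (i, j, PySem.List.pyGetD qubo (i * size - PySem.Int.floordiv (i * (i - 1)) 2 + (j - i)) 0))) := by
  intro n
  induction n with
  | zero =>
    intro k hk hn acc
    rw [PySem.List.pyRange_one_eq_nil (by omega)]
    simp
  | succ m ih =>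
    intro k hk hn acc
    have hks : k < size := by omega
    rw [PySem.List.pyRange_one_cons hks]
    simp only [List.foldl_cons, List.flatMap_cons]
    rw [cq_inner qubo k size ((size - k).toNat) k rfl acc (cq_tri size k)]
    rw [cq_tri_succ size k hks]
    rw [ih (k + 1) (by omega) (by omega)]
    simp only [List.append_assoc]
    rfl

-- ===== VERDICT (by name: the statement is the Claim_ definition above) =====
theorem create_qubo_spec : Claim_equal_create_qubo := by
  intro qubo size _ _
  unfold Spec_create_qubo create_qubo create_qubo_alt
  have h0 : cq_tri size 0 = 0 := by
    unfold cq_tri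
    have : PySem.Int.floordiv (0 * (0 - 1)) 2 = 0 := by decide
    rw [this]; ring
  have h := cq_outer qubo size ((size - 0).toNat) 0 le_rfl rfl []
  rw [h0] at h
  simpa using h
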